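-- pv_equiv track=rewrite | github.com/ReyhanArdiya/Jay-ds-algo | mine/ch-12/add_until_100.py | add_until_100
-- ===== SOURCE A (Python) =====
-- def add_until_100(array):
--     if len(array) == 0:
--         return 0
--
--     res = add_until_100(array[1:])
--     if array[0] + res > 100:
--         return res
--     else:
--         return array[0] + res
-- ===== SOURCE B (Python) =====
-- def add_until_100(array):
--     res = 0
--     for i in reversed(range(len(array))):
--         if array[i] + res > 100:
--             continue
--         res += array[i]
--     return res
-- ===== Notes on version B (the rewrite author's own statement) =====
-- stated objective: faster
-- what changed: Replaced the self-recursion over array[1:] (which copies the list slice at every level) with an explicit right-to-left index loop over a single accumulator.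
import Mathlib
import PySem

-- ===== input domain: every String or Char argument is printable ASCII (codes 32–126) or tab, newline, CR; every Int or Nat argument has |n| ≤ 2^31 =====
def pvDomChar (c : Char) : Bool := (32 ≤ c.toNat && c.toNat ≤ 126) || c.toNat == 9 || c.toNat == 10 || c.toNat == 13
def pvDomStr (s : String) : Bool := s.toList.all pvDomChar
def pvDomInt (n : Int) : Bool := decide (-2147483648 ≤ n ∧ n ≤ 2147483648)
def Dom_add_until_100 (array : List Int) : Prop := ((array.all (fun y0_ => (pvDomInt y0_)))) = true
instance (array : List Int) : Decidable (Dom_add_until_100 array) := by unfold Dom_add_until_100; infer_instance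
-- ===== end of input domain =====

-- B replaces A's slice-copying self-recursion with a right-to-left loop over an accumulator (faster: no per-level slice copies).


-- ===== PORT A =====
def add_until_100 : List Int → Int
  | [] => 0
  | a :: t =>
    let res := add_until_100 t
    if a + res > 100 then res else a + res

-- ===== PORT B =====
-- explicit right-to-left loop with an accumulator, instead of A's recursion over array[1:]
def add_until_100_alt (array : List Int) : Int :=
  array.reverse.foldl (fun res x => if x + res > 100 then res else x + res) 0

-- ===== PRECONDITION & SPEC =====
def Spec_add_until_100 (array : List Int) (out : Int) : Prop := out = add_until_100_alt array
instance (array : List Int) (out : Int) : Decidable (Spec_add_until_100 array out) := by unfold Spec_add_until_100; infer_instance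

-- ===== CLAIM (what is proved, stated in full; the proofs are below) =====
def Claim_equal_add_until_100 : Prop := ∀ (array : List Int), Dom_add_until_100 array → Spec_add_until_100 array (add_until_100 array)

-- ===== LEMMAS AND PROOFS =====

-- ===== VERDICT (by name: the statement is the Claim_ definition above) =====
theorem add_until_100_rev (l : List Int) :
    l.reverse.foldl (fun res x => if x + res > 100 then res else x + res) 0 = add_until_100 l := by
  induction l with
  | nil => rfl
  | cons a t ih =>
    simp [List.reverse_cons, List.foldl_append, ih, add_until_100]

theorem add_until_100_spec : Claim_equal_add_until_100 := by
  intro array _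
  unfold Spec_add_until_100 add_until_100_alt
  exact (add_until_100_rev array).symm
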